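-- pv_equiv track=rewrite | github.com/guslott/spikehound | daq/backyard_brains.py | _iter_complete_messages
-- ===== SOURCE A (Python) =====
-- def _iter_complete_messages(text_buffer: str) -> tuple[list[str], str]:
--     messages: list[str] = []
--     last = text_buffer.rfind(";")
--     if last < 0:
--         return messages, text_buffer[-512:]
--
--     complete = text_buffer[: last + 1]
--     remainder = text_buffer[last + 1 :]
--     for token in complete.split(";"):
--         token = token.strip()
--         if ":" not in token:
--             continue
--         messages.append(token + ";")
--     return messages, remainder[-512:]
-- ===== SOURCE B (Python) =====
-- def _iter_complete_messages(text_buffer: str) -> tuple[list[str], str]: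
--     # Single-pass character state machine: accumulate the current fragment;
--     # each ';' completes it (kept iff it contains ':'); what is left is the remainder.
--     messages: list[str] = []
--     cur: list[str] = []
--     for ch in text_buffer:
--         if ch == ";":
--             token = "".join(cur).strip()
--             cur = []
--             if ":" in token:
--                 messages.append(token + ";")
--         else:
--             cur.append(ch)
--     return messages, "".join(cur)[-512:]
-- ===== Notes on version B (the rewrite author's own statement) =====
-- stated objective: alternative
-- what changed: Replaces A's rfind-then-slice-then-split two-stage decomposition with a single character-level state machine that accumulates the current fragment and emits a message at each ';', the leftover accumulator being the remainder; no rfind, no slicing, no split.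
import Mathlib
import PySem

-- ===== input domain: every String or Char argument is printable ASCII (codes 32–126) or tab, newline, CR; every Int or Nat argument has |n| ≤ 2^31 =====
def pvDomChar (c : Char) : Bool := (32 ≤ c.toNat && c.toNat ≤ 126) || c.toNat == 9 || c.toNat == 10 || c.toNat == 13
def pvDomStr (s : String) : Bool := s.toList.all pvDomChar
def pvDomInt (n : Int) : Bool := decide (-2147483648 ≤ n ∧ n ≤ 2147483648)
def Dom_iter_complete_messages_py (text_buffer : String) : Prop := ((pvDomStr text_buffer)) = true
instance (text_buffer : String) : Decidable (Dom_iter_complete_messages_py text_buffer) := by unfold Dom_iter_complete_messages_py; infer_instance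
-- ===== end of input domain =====

-- B replaces A's rfind-then-slice-then-split two-stage decomposition by a single character-level
-- state machine (accumulate current fragment; each ';' completes it, leftover is the remainder);
-- objective: alternative.

-- ===== PORT A =====
def iter_complete_messages_py (text_buffer : String) : List String × String :=
  let messages : List String := []
  let last := PySem.Str.rfind text_buffer ";"
  if last < 0 then
    (messages, PySem.Str.slice text_buffer (some (-512)) none)
  else
    let complete := PySem.Str.slice text_buffer none (some (last + 1))
    let remainder := PySem.Str.slice text_buffer (some (last + 1)) none
    let messages := ((PySem.Str.split? complete ";").getD []).foldl
      (fun acc token =>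
        let token := PySem.Str.strip token
        if PySem.Str.isIn ":" token then acc ++ [token ++ ";"] else acc) messages
    (messages, PySem.Str.slice remainder (some (-512)) none)

-- ===== PORT B =====
def iter_complete_messages_py_alt (text_buffer : String) : List String × String :=
  -- for ch in text_buffer: if ch == ';' complete the current fragment, else extend it
  let r := text_buffer.toList.foldl
    (fun (st : List String × List Char) ch =>
      if ch = ';' then
        let token := PySem.Str.strip (String.ofList st.2)
        (if PySem.Str.isIn ":" token then st.1 ++ [token ++ ";"] else st.1, ([] : List Char))
      else (st.1, st.2 ++ [ch]))
    ([], [])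
  (r.1, PySem.Str.slice (String.ofList r.2) (some (-512)) none)

-- ===== PRECONDITION & SPEC =====
def Spec_iter_complete_messages_py (text_buffer : String) (out : List String × String) : Prop := out = iter_complete_messages_py_alt text_buffer
instance (text_buffer : String) (out : List String × String) : Decidable (Spec_iter_complete_messages_py text_buffer out) := by unfold Spec_iter_complete_messages_py; infer_instance

-- ===== CLAIM (what is proved, stated in full; the proofs are below) =====
def Claim_equal_iter_complete_messages_py : Prop := ∀ (text_buffer : String), Dom_iter_complete_messages_py text_buffer → Spec_iter_complete_messages_py text_buffer (iter_complete_messages_py text_buffer)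

-- ===== LEMMAS AND PROOFS =====

-- messages emitted for a list of completed fragments
def pvEmit (pieces : List (List Char)) : List String :=
  ((pieces.map (fun p => PySem.Str.strip (String.ofList p))).filter
    (fun t => PySem.Str.isIn ":" t)).map (fun t => t ++ ";")

-- [c].isPrefixOf t is exactly "t starts with c"
theorem pvPrefixSingleton (c : Char) (t : List Char) :
    [c].isPrefixOf t = true ↔ t[0]? = some c := by
  rw [List.isPrefixOf_iff_prefix]
  cases t with
  | nil => simp
  | cons a l =>
    constructor
    · rintro ⟨r, hr⟩
      simp only [List.singleton_append, List.cons.injEq] at hr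
      simp [hr.1]
    · intro h
      simp only [List.getElem?_cons_zero, Option.some_inj] at h
      exact ⟨l, by simp [h]⟩

theorem pvRfindGoZero (s sub : List Char) :
    PySem.Chars.rfind.go s sub 0 = if sub.isPrefixOf s then 0 else -1 := rfl

theorem pvRfindGoSucc (s sub : List Char) (j : Nat) :
    PySem.Chars.rfind.go s sub (j + 1) =
      if sub.isPrefixOf (s.drop (j + 1)) then ((j + 1 : Nat) : Int)
      else PySem.Chars.rfind.go s sub j := rfl

-- full characterisation of rfind.go for a single-character needle
theorem pvRfindGo (s : List Char) (c : Char) (j : Nat) :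
    (PySem.Chars.rfind.go s [c] j = -1 ∧ ∀ i, i ≤ j → s[i]? ≠ some c) ∨
    (∃ k : Nat, PySem.Chars.rfind.go s [c] j = (k : Int) ∧ k ≤ j ∧ s[k]? = some c ∧
      ∀ i, k < i → i ≤ j → s[i]? ≠ some c) := by
  induction j with
  | zero =>
    rw [pvRfindGoZero]
    by_cases h : s[0]? = some c
    · right
      refine ⟨0, ?_, le_refl 0, h, by omega⟩
      rw [if_pos (by rw [pvPrefixSingleton]; simpa using h)]
      rfl
    · left
      refine ⟨?_, fun i hi => ?_⟩
      · rw [if_neg (fun hb => h (by simpa using (pvPrefixSingleton c s).1 hb))]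
      · interval_cases i
        simpa using h
  | succ j ih =>
    rw [pvRfindGoSucc]
    by_cases h : s[j + 1]? = some c
    · right
      refine ⟨j + 1, ?_, le_refl _, h, by omega⟩
      rw [if_pos (by rw [pvPrefixSingleton]; simpa [List.getElem?_drop] using h)]
    · rw [if_neg (fun hb => h (by
        simpa [List.getElem?_drop] using (pvPrefixSingleton c (s.drop (j + 1))).1 hb))]
      rcases ih with ⟨h1, h2⟩ | ⟨k, hk, hkj, hks, hknone⟩
      · left
        refine ⟨h1, fun i hi => ?_⟩
        rcases Nat.lt_or_ge i (j + 1) with hlt | hge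
        · exact h2 i (by omega)
        · have : i = j + 1 := by omega
          simpa [this] using h
      · right
        refine ⟨k, hk, by omega, hks, fun i h1 h2 => ?_⟩
        rcases Nat.lt_or_ge i (j + 1) with hlt | hge
        · exact hknone i h1 (by omega)
        · have : i = j + 1 := by omega
          simpa [this] using h

theorem pvSplitGoZero (sep l cur : List Char) (acc : List (List Char)) :
    PySem.Chars.splitOn.go sep 0 l cur acc = ((cur.reverse ++ l) :: acc).reverse := rfl

theorem pvSplitGoNil (sep cur : List Char) (f : Nat) (acc : List (List Char)) :
    PySem.Chars.splitOn.go sep (f + 1) [] cur acc = (cur.reverse :: acc).reverse := rfl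

theorem pvSplitGoCons (sep cur rest : List Char) (c : Char) (f : Nat) (acc : List (List Char)) :
    PySem.Chars.splitOn.go sep (f + 1) (c :: rest) cur acc =
      if sep.isPrefixOf (c :: rest)
      then PySem.Chars.splitOn.go sep f (List.drop sep.length (c :: rest)) [] (cur.reverse :: acc)
      else PySem.Chars.splitOn.go sep f rest (c :: cur) acc := rfl

-- splitOn.go with a single-character separator computes List.splitOn
theorem pvSplitGo (c : Char) : ∀ (fuel : Nat) (l cur : List Char) (acc : List (List Char)),
    l.length ≤ fuel →
    PySem.Chars.splitOn.go [c] fuel l cur acc =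
      acc.reverse ++ (List.splitOn c l).modifyHead (cur.reverse ++ ·) := by
  intro fuel
  induction fuel with
  | zero =>
    intro l cur acc hl
    have : l = [] := by cases l <;> simp_all
    subst this
    rw [pvSplitGoZero]
    simp [List.splitOn, List.splitOnP_nil]
  | succ f ih =>
    intro l cur acc hl
    cases l with
    | nil =>
      rw [pvSplitGoNil]
      simp [List.splitOn, List.splitOnP_nil]
    | cons ch rest =>
      rw [pvSplitGoCons]
      by_cases hc : ch = c
      · subst hc
        rw [if_pos (by rw [pvPrefixSingleton]; simp)]
        have hdrop : List.drop [ch].length (ch :: rest) = rest := rfl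
        rw [hdrop, ih rest [] (cur.reverse :: acc) (by simpa using Nat.le_of_succ_le_succ hl)]
        conv_rhs => rw [List.splitOn, List.splitOnP_cons]
        simp only [beq_self_eq_true, if_true, List.modifyHead_cons]
        rcases hX : List.splitOnP (fun x => x == ch) rest with _ | ⟨x, xs⟩
        · exact absurd hX (List.splitOnP_ne_nil _ _)
        · simp [List.splitOn, hX]
      · have hnp : ¬ [c].isPrefixOf (ch :: rest) = true := by
          intro hb
          have h2 := (pvPrefixSingleton c (ch :: rest)).1 hb
          simp only [List.getElem?_cons_zero, Option.some_inj] at h2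
          exact hc h2
        rw [if_neg hnp]
        rw [ih rest (ch :: cur) acc (by simpa using Nat.le_of_succ_le_succ hl)]
        conv_rhs => rw [List.splitOn, List.splitOnP_cons]
        have hbe : (ch == c) = false := by simpa using hc
        simp only [hbe, Bool.false_eq_true, if_false]
        rcases hX : List.splitOnP (fun x => x == c) rest with _ | ⟨x, xs⟩
        · exact absurd hX (List.splitOnP_ne_nil _ _)
        · simp [List.splitOn, hX]

theorem pvSplitOnEq (s : List Char) (c : Char) :
    PySem.Chars.splitOn s [c] = List.splitOn c s := by
  rw [PySem.Chars.splitOn, pvSplitGo c (s.length + 1) s [] [] (by omega)]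
  rcases hX : List.splitOn c s with _ | ⟨x, xs⟩
  · exact absurd hX (List.splitOnP_ne_nil _ _)
  · simp

-- splitting at an explicit separator occurrence splits the stream
theorem pvSplitOnAppend (c : Char) : ∀ (xs ys : List Char),
    List.splitOn c (xs ++ c :: ys) = List.splitOn c xs ++ List.splitOn c ys := by
  intro xs ys
  induction xs with
  | nil => simp [List.splitOn, List.splitOnP_cons]
  | cons x l ih =>
    by_cases hx : x = c
    · subst hx
      simp only [List.cons_append, List.splitOn, List.splitOnP_cons, beq_self_eq_true, if_true]
      simpa [List.splitOn] using ih
    · have hbe : (x == c) = false := by simpa using hx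
      simp only [List.cons_append, List.splitOn, List.splitOnP_cons, hbe, Bool.false_eq_true,
        if_false]
      rw [show List.splitOnP (fun a => a == c) (l ++ c :: ys) = List.splitOn c (l ++ c :: ys) from rfl, ih]
      rcases hX : List.splitOnP (fun a => a == c) l with _ | ⟨h, t⟩
      · exact absurd hX (List.splitOnP_ne_nil _ _)
      · simp [List.splitOn, hX]

theorem pvSplitOnNoSep (c : Char) : ∀ (l : List Char), c ∉ l → List.splitOn c l = [l] := by
  intro l
  induction l with
  | nil => intro _; rfl
  | cons x t ih =>
    intro h
    have hx : (x == c) = false := beq_eq_false_iff_ne.mpr (fun he => h (by simp [he]))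
    have ht := ih (fun hm => h (List.mem_cons_of_mem _ hm))
    simp only [List.splitOn, List.splitOnP_cons, hx, Bool.false_eq_true, if_false]
    rw [show List.splitOnP (fun a => a == c) t = List.splitOn c t from rfl, ht]
    rfl

theorem pvNotMemOfNoHit (s : List Char) (c : Char)
    (h : ∀ i, i ≤ s.length → s[i]? ≠ some c) : c ∉ s := by
  intro hm
  obtain ⟨i, hi, he⟩ := List.getElem_of_mem hm
  exact h i (by omega) (by simp [he, List.getElem?_eq_getElem hi])

-- invariant of B's state machine: the finished messages and the pending fragment are exactly
-- determined by List.splitOn of (pending fragment ++ remaining input)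
theorem pvFoldB : ∀ (l cur : List Char) (ms : List String), ';' ∉ cur →
    l.foldl
      (fun (st : List String × List Char) ch =>
        if ch = ';' then
          let token := PySem.Str.strip (String.ofList st.2)
          (if PySem.Str.isIn ":" token then st.1 ++ [token ++ ";"] else st.1, ([] : List Char))
        else (st.1, st.2 ++ [ch]))
      (ms, cur)
    = (ms ++ pvEmit ((List.splitOn ';' (cur ++ l)).dropLast),
       (List.splitOn ';' (cur ++ l)).getLastD []) := by
  intro l
  induction l with
  | nil =>
    intro cur ms hnot
    rw [List.foldl_nil, List.append_nil, pvSplitOnNoSep _ _ hnot]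
    simp [pvEmit]
  | cons c l ih =>
    intro cur ms hnot
    by_cases hc : c = ';'
    · subst hc
      rw [List.foldl_cons, if_pos rfl]
      rw [ih [] _ (by simp)]
      rw [pvSplitOnAppend, pvSplitOnNoSep _ _ hnot, List.singleton_append, List.nil_append]
      rcases hX : List.splitOn ';' l with _ | ⟨x, xs⟩
      · exact absurd hX (List.splitOnP_ne_nil _ _)
      · simp only [List.dropLast_cons_of_ne_nil (by simp : x :: xs ≠ []), List.getLastD_cons]
        refine congrArg₂ Prod.mk ?_ ?_
        · have hts : PySem.Str.isIn ":" (PySem.Str.strip (String.ofList cur))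
              = PySem.Chars.isIn [':'] (PySem.Chars.strip cur) := by
            simp [PySem.Str.isIn, PySem.Str.toList_strip]
          simp only [pvEmit, List.map_cons, List.filter_cons, hts]
          split_ifs <;> simp [List.append_assoc]
        · rcases xs <;> simp
    · rw [List.foldl_cons, if_neg hc]
      rw [ih (cur ++ [c]) ms (by
        intro hm
        rcases List.mem_append.1 hm with h1 | h1
        · exact hnot h1
        · simp at h1; exact hc h1.symm)]
      simp [List.append_assoc]

theorem iter_complete_messages_py_spec_aux (text_buffer : String) :
    iter_complete_messages_py text_buffer = iter_complete_messages_py_alt text_buffer := by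
  unfold iter_complete_messages_py iter_complete_messages_py_alt
  rw [pvFoldB text_buffer.toList [] [] (by simp)]
  simp only [List.nil_append]
  have hrfind : PySem.Str.rfind text_buffer ";" =
      PySem.Chars.rfind.go text_buffer.toList [';'] text_buffer.toList.length := by
    rw [PySem.Str.rfind_eq]; rfl
  rcases pvRfindGo text_buffer.toList ';' text_buffer.toList.length with
    ⟨hneg, hnone⟩ | ⟨k, hk, hkj, hks, hknone⟩
  · -- no ';' in the buffer
    have hlt : PySem.Str.rfind text_buffer ";" < 0 := by rw [hrfind, hneg]; norm_num
    have hnot : ';' ∉ text_buffer.toList := pvNotMemOfNoHit _ _ hnone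
    rw [if_pos hlt, pvSplitOnNoSep _ _ hnot]
    simp [pvEmit, String.ofList_toList]
  · -- last occurrence at index k
    have hklen : k < text_buffer.toList.length := by
      by_contra hge
      exact absurd hks (by simp [List.getElem?_eq_none (by omega : text_buffer.toList.length ≤ k)])
    have hnlt : ¬ PySem.Str.rfind text_buffer ";" < 0 := by rw [hrfind, hk]; omega
    have hdecomp : text_buffer.toList =
        text_buffer.toList.take k ++ ';' :: text_buffer.toList.drop (k + 1) := by
      conv_lhs => rw [← List.take_append_drop k text_buffer.toList,
        List.drop_eq_getElem_cons hklen]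
      have : text_buffer.toList[k] = ';' := by
        have := List.getElem?_eq_getElem hklen
        rw [hks] at this; exact (Option.some_inj.1 this.symm)
      rw [this]
    set a := text_buffer.toList.take k with ha
    set b := text_buffer.toList.drop (k + 1) with hb
    have halen : a.length = k := by rw [ha, List.length_take]; omega
    have hbnot : ';' ∉ b := by
      intro hm
      obtain ⟨m, hmlt, hme⟩ := List.getElem_of_mem hm
      have : text_buffer.toList[k + 1 + m]? = some ';' := by
        have := List.getElem?_drop (xs := text_buffer.toList) (i := k + 1) (j := m)
        rw [← hb, List.getElem?_eq_getElem hmlt, hme] at this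
        exact this.symm
      have hlen : k + 1 + m ≤ text_buffer.toList.length := by
        have : b.length = text_buffer.toList.length - (k + 1) := by simp [hb]
        omega
      exact hknone (k + 1 + m) (by omega) hlen this
    have hsplitT : List.splitOn ';' text_buffer.toList = List.splitOn ';' a ++ [b] := by
      conv_lhs => rw [hdecomp]
      rw [pvSplitOnAppend, pvSplitOnNoSep _ _ hbnot]
    have htoNat : ((k : Int) + 1).toNat = k + 1 := by omega
    have hcomplete : (PySem.Str.slice text_buffer none (some (PySem.Str.rfind text_buffer ";" + 1))).toList
        = a ++ [';'] := by
      rw [PySem.Str.toList_slice, PySem.Chars.slice_eq_listSlice, hrfind, hk,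
        PySem.List.slice_to _ (by omega), htoNat]
      conv_lhs => rw [hdecomp]
      rw [List.take_append, halen, List.take_of_length_le (by omega)]
      have h1 : k + 1 - k = 1 := by omega
      rw [h1]
      simp
    have hremainder : (PySem.Str.slice text_buffer (some (PySem.Str.rfind text_buffer ";" + 1)) none).toList
        = b := by
      rw [PySem.Str.toList_slice, PySem.Chars.slice_eq_listSlice, hrfind, hk,
        PySem.List.slice_from _ (by omega), htoNat]
    have hsplitA : PySem.Str.split? (PySem.Str.slice text_buffer none (some (PySem.Str.rfind text_buffer ";" + 1))) ";"
        = some ((List.splitOn ';' a ++ [[]]).map String.ofList) := by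
      simp only [PySem.Str.split?, PySem.Chars.split?]
      rw [if_neg (by simp), hcomplete]
      rw [show (";" : String).toList = [';'] from rfl, pvSplitOnEq,
        show a ++ [';'] = a ++ ';' :: [] from rfl, pvSplitOnAppend]
      rfl
    rw [if_neg hnlt, hsplitT, List.dropLast_concat]
    simp only [hsplitA, Option.getD_some]
    refine congrArg₂ Prod.mk ?_ ?_
    · -- messages
      show (((List.splitOn ';' a ++ [[]]).map String.ofList).foldl
          (fun acc token =>
            if PySem.Str.isIn ":" (PySem.Str.strip token) = true
            then acc ++ [PySem.Str.strip token ++ ";"] else acc) []) = _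
      rw [PySem.List.foldl_append_if (fun t => PySem.Str.isIn ":" (PySem.Str.strip t))
        (fun t => PySem.Str.strip t ++ ";")]
      have hempty : List.filter (fun t => PySem.Str.isIn ":" (PySem.Str.strip t))
          [String.ofList []] = [] := by decide
      simp only [List.map_append, List.map_cons, List.map_nil, List.filter_append,
        List.nil_append, hempty, List.append_nil]
      simp [pvEmit, List.filter_map, List.map_map, Function.comp_def]
    · -- remainder
      have : PySem.Str.slice text_buffer (some (PySem.Str.rfind text_buffer ";" + 1)) none
          = String.ofList ((List.splitOn ';' a ++ [b]).getLastD []) := by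
        rw [← String.toList_inj, hremainder]
        simp
      rw [this]

-- ===== VERDICT (by name: the statement is the Claim_ definition above) =====
theorem iter_complete_messages_py_spec : Claim_equal_iter_complete_messages_py := by
  intro text_buffer _
  exact iter_complete_messages_py_spec_aux text_buffer
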